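-- pv_equiv track=rewrite | github.com/ES-Alexander/intro-to-monty | Lessons/lesson_formatter.py | hash_line
-- ===== SOURCE A (Python) =====
-- HASHES = ''
--
-- BLANK = ' '
--
-- def hash_line(information):
--     ''' Generates a hash-bordered line containing the given information.
--
--     Information can also optionally be HASHES for a full line of hashes, or
--         BLANK, for a blank line, or a list of values. List lines longer than 80
--         characters long are split to fit within the 80 character limit.
--
--     hash_line(str/list) -> str
--
--     '''
--     line = '#'
--     if information == HASHES:
--         for x in range(79):
--             line += '#'
--     elif information == BLANK:
--         for x in range(78):
--             line += ' '
--         line += '#'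
--     elif isinstance(information, str):
--         line += center_string(information, 78, ' ') + '#'
--     elif isinstance(information, list):
--         line = hash_border_list(information)
--     else:
--         raise TypeError('hash_line only accepts arguments of type str or list.')
--     return line + '\n'
--
-- def center_string(string, length, symbol):
--     ''' Returns the given string with even symbols on either side.
--
--     Preferentially has one additional space before the string, for string of odd
--         length.
--
--     space_string(str, int, str) -> str
--
--     '''
--     output = ' ' + string + ' '
--     symbols = length - len(output)
--     if symbols % 2 == 0:
--         symbol_string = gen_symbol_string(symbols // 2, symbol)
--         return symbol_string + output + symbol_string
--     else:
--         before_string = gen_symbol_string((symbols // 2) + 1, symbol)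
--         after_string = gen_symbol_string(symbols // 2, symbol)
--         return before_string + output + after_string
--
-- def hash_border_list(info_list):
--     ''' Returns the formatted list of information in hash-bordered lines.
--
--     Maintains the 80 character width limit.
--
--     topics_line(list[str]) -> str
--
--     '''
--     line = '#'
--     index = 0
--     prev_list_string = ''
--     new_list_string = ''
--     while(len(new_list_string) < 74 and index < len(info_list)):
--         prev_list_string = new_list_string
--         new_list_string += ', ' + info_list[index]
--         if index == 0:
--             new_list_string = new_list_string[2:]
--         index += 1
--     if len(new_list_string) < 76 and index >= len(info_list):
--         # line completely finished
--         return line + center_string(new_list_string, 78, BLANK) + '#'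
--     else:
--         # line overflow -> recursive fix
--         line += center_string(prev_list_string + ',', 78, BLANK) + '#\n'
--         # run again for remainder of the list, until entire list is formatted
--         line += hash_border_list(info_list[(index - 1):])
--         return line
--
-- def gen_symbol_string(num_symbols, symbol):
--     ''' Returns a string of symbols with length 'num_symbols'.
--
--     gen_symbol_string(int) -> str
--
--     '''
--     symbol_string = ''
--     for i in range(num_symbols):
--         symbol_string += symbol
--     return symbol_string
-- ===== SOURCE B (Python) =====
-- def hash_line(information):
--     """Hash-bordered 80-char line: closed-form padding arithmetic instead of
--     character-appending loops and centering helpers."""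
--     if information == '':
--         return '#' * 80 + '\n'
--     if information == ' ':
--         return '#' + ' ' * 78 + '#\n'
--     pad = 76 - len(information)
--     return '#' + ' ' * (pad - pad // 2) + ' ' + information + ' ' + ' ' * (pad // 2) + '#\n'
-- ===== Notes on version B (the rewrite author's own statement) =====
-- stated objective: simpler
-- what changed: Replaces the helper chain (center_string / gen_symbol_string and the char-by-char border loops) with one closed-form computation of the left/right padding widths and direct string repetition; the list branch is unreachable for a str argument and is dropped.
import Mathlib
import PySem

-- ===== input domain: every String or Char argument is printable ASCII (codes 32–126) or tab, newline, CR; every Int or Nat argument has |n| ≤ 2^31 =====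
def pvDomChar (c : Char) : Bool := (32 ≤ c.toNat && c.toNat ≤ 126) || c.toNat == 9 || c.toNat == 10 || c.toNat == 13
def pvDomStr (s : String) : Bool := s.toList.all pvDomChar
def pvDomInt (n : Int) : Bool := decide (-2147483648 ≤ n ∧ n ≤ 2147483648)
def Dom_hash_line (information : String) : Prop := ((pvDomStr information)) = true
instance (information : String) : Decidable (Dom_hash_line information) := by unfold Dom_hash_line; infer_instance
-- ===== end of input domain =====

-- B replaces A's center_string/gen_symbol_string helper chain and char-appending loops with
-- closed-form padding arithmetic and bulk repetition (objective: simpler). With a str argument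
-- A's list branch is unreachable, so both programs are total and equal on all strings.

-- ===== PORT A =====
-- gen_symbol_string: builds the string one symbol at a time over range(num_symbols)
def gen_symbol_string (num_symbols : Int) (symbol : List Char) : List Char :=
  (PySem.List.pyRange 0 num_symbols 1).foldl (fun acc _ => acc ++ symbol) []

def center_string (string : List Char) (length : Int) (symbol : List Char) : List Char :=
  let output := [' '] ++ string ++ [' ']
  let symbols : Int := length - (output.length : Int)
  if PySem.Int.mod symbols 2 = 0 then
    let symbol_string := gen_symbol_string (PySem.Int.floordiv symbols 2) symbol
    symbol_string ++ output ++ symbol_string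
  else
    let before_string := gen_symbol_string (PySem.Int.floordiv symbols 2 + 1) symbol
    let after_string := gen_symbol_string (PySem.Int.floordiv symbols 2) symbol
    before_string ++ output ++ after_string

-- hash_line: the isinstance(information, str) branch always applies for a str argument,
-- so the list branch and the TypeError raise are unreachable here.
def hash_line (information : String) : String :=
  let info := information.toList
  let line := ['#']
  if info = [] then
    String.ofList (((PySem.List.pyRange 0 79 1).foldl (fun acc _ => acc ++ ['#']) line) ++ ['\n'])
  else if info = [' '] then
    String.ofList ((((PySem.List.pyRange 0 78 1).foldl (fun acc _ => acc ++ [' ']) line) ++ ['#']) ++ ['\n'])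
  else
    String.ofList ((line ++ center_string info 78 [' '] ++ ['#']) ++ ['\n'])

-- ===== PORT B =====
def hash_line_alt (information : String) : String :=
  let info := information.toList
  if info = [] then
    String.ofList (PySem.List.pyRepeat ['#'] 80 ++ ['\n'])
  else if info = [' '] then
    String.ofList (['#'] ++ PySem.List.pyRepeat [' '] 78 ++ ['#', '\n'])
  else
    let pad : Int := 76 - (info.length : Int)
    String.ofList (['#'] ++ PySem.List.pyRepeat [' '] (pad - PySem.Int.floordiv pad 2) ++ [' ']
               ++ info ++ [' '] ++ PySem.List.pyRepeat [' '] (PySem.Int.floordiv pad 2) ++ ['#', '\n'])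

-- ===== PRECONDITION & SPEC =====
def Spec_hash_line (information : String) (out : String) : Prop := out = hash_line_alt information
instance (information : String) (out : String) : Decidable (Spec_hash_line information out) := by unfold Spec_hash_line; infer_instance

-- ===== CLAIM (what is proved, stated in full; the proofs are below) =====
def Claim_equal_hash_line : Prop := ∀ (information : String), Dom_hash_line information → Spec_hash_line information (hash_line information)

-- ===== LEMMAS AND PROOFS =====
theorem foldl_append_singleton (l : List Int) (c : Char) (init : List Char) :
    l.foldl (fun acc _ => acc ++ [c]) init = init ++ List.replicate l.length c := by
  induction l generalizing init with
  | nil => simp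
  | cons x t ih =>
      simp only [List.foldl_cons, ih, List.length_cons, List.replicate_succ]
      simp

theorem gen_symbol_string_eq (n : Int) (c : Char) :
    gen_symbol_string n [c] = List.replicate n.toNat c := by
  unfold gen_symbol_string
  rw [foldl_append_singleton]
  simp [PySem.List.length_pyRange_one]

-- ===== VERDICT (by name: the statement is the Claim_ definition above) =====
theorem hash_line_spec : Claim_equal_hash_line := by
  intro information _
  unfold Spec_hash_line hash_line hash_line_alt
  by_cases h0 : information.toList = []
  · simp only [h0, reduceIte]
    decide
  · by_cases h1 : information.toList = [' ']
    · simp only [h0, h1, reduceCtorEq, reduceIte]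
      decide
    · simp only [h0, h1, reduceIte]
      apply congrArg String.ofList
      unfold center_string
      simp only [PySem.List.pyRepeat_singleton, gen_symbol_string_eq]
      set n : Int := (information.toList.length : Int) with hn
      have hfd : PySem.Int.floordiv (78 - (([' '] ++ information.toList ++ [' ']).length : Int)) 2
          = (78 - (([' '] ++ information.toList ++ [' ']).length : Int)) / 2 :=
        PySem.Int.floordiv_eq_ediv_of_pos (by omega)
      have hmd : PySem.Int.mod (78 - (([' '] ++ information.toList ++ [' ']).length : Int)) 2
          = (78 - (([' '] ++ information.toList ++ [' ']).length : Int)) % 2 :=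
        PySem.Int.mod_eq_emod_of_pos (by omega)
      have hfd' : PySem.Int.floordiv (76 - n) 2 = (76 - n) / 2 :=
        PySem.Int.floordiv_eq_ediv_of_pos (by omega)
      have hlen : ((([' '] ++ information.toList ++ [' ']).length : Int)) = n + 2 := by
        simp [hn]; omega
      rw [hmd, hfd, hfd', hlen]
      have hpad : 78 - (n + 2) = 76 - n := by ring
      rw [hpad]
      by_cases hev : (76 - n) % 2 = 0
      · rw [if_pos hev]
        have : ((76 - n) - (76 - n) / 2).toNat = ((76 - n) / 2).toNat := by omega
        rw [this]
        simp
      · rw [if_neg hev]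
        have : ((76 - n) - (76 - n) / 2).toNat = ((76 - n) / 2 + 1).toNat := by omega
        rw [this]
        simp
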